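-- pv_equiv track=rewrite | github.com/marharytapaduchak/descretemath-lab2-team47 | lab.py | iterative_adjacency_dict_dfs
-- ===== SOURCE A (Python) =====
-- def iterative_adjacency_dict_dfs(graph: dict[int, list[int]], start: int) -> list[int]:
--     """
--     :param list[list] graph: the adjacency list of a given graph
--     :param int start: start vertex of search
--     :returns list[int]: the dfs traversal of the graph
--     >>> iterative_adjacency_dict_dfs({0: [1, 2], 1: [0, 2], 2: [0, 1]}, 0)
--     [0, 1, 2]
--     >>> iterative_adjacency_dict_dfs({0: [1, 2], 1: [0, 2, 3], 2: [0, 1], 3: []}, 0)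
--     [0, 1, 2, 3]
--     """
--     visited = set()
--     stack = [start]
--     traversal = []
--
--     while stack:
--         current = stack.pop()
--         if current in visited:
--             continue
--
--         visited.add(current)
--         traversal.append(current)
--
--         for neighbor in sorted(graph[current], reverse=True):
--             if neighbor not in visited:
--                 stack.append(neighbor)
--
--     return traversal
-- ===== SOURCE B (Python) =====
-- def iterative_adjacency_dict_dfs(graph: dict[int, list[int]], start: int) -> list[int]:
--     visited = set()
--     traversal = []
--
--     def dfs(v):
--         if v in visited:
--             return
--         visited.add(v)
--         traversal.append(v)
--         for neighbor in sorted(graph[v]):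
--             dfs(neighbor)
--
--     dfs(start)
--     return traversal
-- ===== Notes on version B (the rewrite author's own statement) =====
-- stated objective: idiomatic
-- what changed: The explicit pop-stack with reverse-sorted pushes and visited-check-at-pop is replaced by the textbook recursive DFS helper that marks a vertex on entry and recurses over its ascending-sorted neighbors; the stack, its duplicate entries and the re-check at pop disappear.
import Mathlib
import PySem

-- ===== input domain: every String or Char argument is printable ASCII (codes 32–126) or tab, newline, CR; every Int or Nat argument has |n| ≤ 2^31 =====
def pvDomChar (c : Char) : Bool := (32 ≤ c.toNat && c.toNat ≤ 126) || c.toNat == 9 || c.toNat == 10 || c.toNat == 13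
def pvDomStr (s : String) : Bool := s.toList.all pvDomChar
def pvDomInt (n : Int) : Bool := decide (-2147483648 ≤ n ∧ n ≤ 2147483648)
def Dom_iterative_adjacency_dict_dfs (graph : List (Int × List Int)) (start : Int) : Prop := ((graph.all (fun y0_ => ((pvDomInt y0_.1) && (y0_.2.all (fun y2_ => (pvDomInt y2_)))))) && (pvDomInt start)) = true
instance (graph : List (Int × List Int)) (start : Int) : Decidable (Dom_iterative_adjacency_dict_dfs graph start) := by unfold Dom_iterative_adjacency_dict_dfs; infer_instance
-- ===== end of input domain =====

-- B replaces A's explicit pop-stack DFS (reverse-sorted pushes, visited check at pop) by the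
-- idiomatic recursive DFS that marks on entry and recurses over ascending-sorted neighbors.


-- ===== PORT A =====
-- Total number of neighbor-list entries; used only to compute a sufficient fuel for A's while-loop
-- (each loop iteration pops one element, and at most 1 + pvAdjSum graph elements are ever pushed).
def pvAdjSum (graph : List (Int × List Int)) : Nat := (graph.map (fun p => p.2.length)).sum

-- A's while-loop. The stack is kept top-first (Python appends/pops at the right end; here push = cons,
-- pop = head — the same stack discipline). The fuel argument is a totality guard only: at the call
-- site below it always exceeds the number of loop iterations, so the 0-case is never reached there.
-- The `none` branch is Python's KeyError at `graph[current]` (excluded by Pre_); the value there is arbitrary.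
def pvDfsALoop (graph : List (Int × List Int)) : Nat → PySem.Set Int → List Int → List Int → List Int
  | 0, _, _, trav => trav
  | _ + 1, _, [], trav => trav
  | fuel + 1, visited, current :: rest, trav =>
    if PySem.Set.contains visited current then
      pvDfsALoop graph fuel visited rest trav
    else
      match (PySem.Dict.mk graph).get? current with
      | none => trav ++ [current]
      | some adj =>
          pvDfsALoop graph fuel (PySem.Set.add visited current)
            ((PySem.List.sorted adj (fun x => x) true).foldl
              (fun s n => if PySem.Set.contains (PySem.Set.add visited current) n then s else n :: s) rest)
            (trav ++ [current])

def iterative_adjacency_dict_dfs (graph : List (Int × List Int)) (start : Int) : List Int :=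
  pvDfsALoop graph (pvAdjSum graph + 2) PySem.Set.empty [start] []

-- ===== PORT B =====
-- B's recursive helper dfs(v) over the shared state (visited, traversal). The fuel argument is a
-- totality guard only (recursion depth is bounded by the number of unvisited graph keys plus one,
-- so the fuel graph.length + 1 used below always suffices). The `none` branch is Python's KeyError
-- at `graph[v]` (excluded by Pre_); visited/traversal were already updated when it fires.
def pvDfsB (graph : List (Int × List Int)) : Nat → (PySem.Set Int × List Int) → Int → (PySem.Set Int × List Int)
  | 0, st, _ => st
  | fuel + 1, st, v =>
    if PySem.Set.contains st.1 v then st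
    else
      match (PySem.Dict.mk graph).get? v with
      | none => (PySem.Set.add st.1 v, st.2 ++ [v])
      | some adj =>
          (PySem.List.sorted adj (fun x => x)).foldl (pvDfsB graph fuel)
            (PySem.Set.add st.1 v, st.2 ++ [v])

def iterative_adjacency_dict_dfs_alt (graph : List (Int × List Int)) (start : Int) : List Int :=
  (pvDfsB graph (graph.length + 1) (PySem.Set.empty, []) start).2

-- ===== PRECONDITION & SPEC =====
-- One saturation step: add the (first-match) neighbor lists of every vertex already collected.
def pvStepR (graph : List (Int × List Int)) (S : List Int) : List Int :=
  S.foldl (fun acc v =>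
    match (PySem.Dict.mk graph).get? v with
    | none => acc
    | some adj => acc ++ adj.filter (fun w => !(acc.contains w))) S

-- pvIter graph n S: the vertices reachable from S along at most n neighbor-expansion rounds.
def pvIter (graph : List (Int × List Int)) : Nat → List Int → List Int
  | 0, S => S
  | n + 1, S => pvStepR graph (pvIter graph n S)

-- Pre_ excludes exactly the inputs on which A raises KeyError: those where some vertex reachable
-- from start (the saturation pvIter; graph.length rounds reach everything) is not a key of graph —
-- B raises KeyError on exactly the same inputs.
def Pre_iterative_adjacency_dict_dfs (graph : List (Int × List Int)) (start : Int) : Prop :=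
  ∀ v ∈ pvIter graph (graph.length + 1) [start], ((PySem.Dict.mk graph).get? v).isSome = true
instance (graph : List (Int × List Int)) (start : Int) : Decidable (Pre_iterative_adjacency_dict_dfs graph start) := by
  unfold Pre_iterative_adjacency_dict_dfs; infer_instance

def pvWitness_iterative_adjacency_dict_dfs : (List (Int × List Int)) × Int :=
  ([(0, [1, 2]), (1, [0, 2]), (2, [0, 1])], 0)

def Spec_iterative_adjacency_dict_dfs (graph : List (Int × List Int)) (start : Int) (out : List Int) : Prop := out = iterative_adjacency_dict_dfs_alt graph start
instance (graph : List (Int × List Int)) (start : Int) (out : List Int) : Decidable (Spec_iterative_adjacency_dict_dfs graph start out) := by unfold Spec_iterative_adjacency_dict_dfs; infer_instance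

-- ===== CLAIM (what is proved, stated in full; the proofs are below) =====
def Claim_equal_iterative_adjacency_dict_dfs : Prop := ∀ (graph : List (Int × List Int)) (start : Int), Dom_iterative_adjacency_dict_dfs graph start → Pre_iterative_adjacency_dict_dfs graph start → Spec_iterative_adjacency_dict_dfs graph start (iterative_adjacency_dict_dfs graph start)

-- ===== LEMMAS AND PROOFS =====

-- Number of graph entries whose key is not yet visited: bounds B's recursion depth.
def pvKB (graph : List (Int × List Int)) (vis : PySem.Set Int) : Nat :=
  (graph.filter (fun p => !(PySem.Set.contains vis p.1))).length

-- Total neighbor-list length over the entries with unvisited key: bounds A's remaining loop work.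
def pvS (graph : List (Int × List Int)) (vis : PySem.Set Int) : Nat :=
  ((graph.filter (fun p => !(PySem.Set.contains vis p.1))).map (fun p => p.2.length)).sum

theorem pvFoldlPres {α β : Type} (f : α → β → α) (P : α → Prop)
    (h : ∀ st v, P st → P (f st v)) :
    ∀ (l : List β) (st : α), P st → P (List.foldl f st l) := by
  intro l
  induction l with
  | nil => intro st hst; simpa using hst
  | cons x l ih => intro st hst; simpa [List.foldl] using ih (f st x) (h st x hst)

theorem pvStep_sub (graph : List (Int × List Int)) (S : List Int) (x : Int)
    (hx : x ∈ S) : x ∈ pvStepR graph S := by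
  unfold pvStepR
  refine pvFoldlPres _ (fun acc => x ∈ acc) ?_ S S hx
  intro acc v h
  cases (PySem.Dict.mk graph).get? v with
  | none => exact h
  | some adj => simp only; exact List.mem_append.2 (Or.inl h)

theorem pvStep_adj_aux (graph : List (Int × List Int)) (v x : Int) (adj : List Int)
    (hget : (PySem.Dict.mk graph).get? v = some adj) (hx : x ∈ adj) :
    ∀ (l acc : List Int), v ∈ l →
      x ∈ List.foldl (fun acc v =>
        match (PySem.Dict.mk graph).get? v with
        | none => acc
        | some adj => acc ++ adj.filter (fun w => !(acc.contains w))) acc l := by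
  intro l
  induction l with
  | nil => intro acc h; exact absurd h (List.not_mem_nil)
  | cons y t ih =>
      intro acc hv
      rcases List.mem_cons.1 hv with rfl | hv
      · simp only [List.foldl]
        refine pvFoldlPres _ (fun acc => x ∈ acc) ?_ t _ ?_
        · intro acc w h
          cases (PySem.Dict.mk graph).get? w with
          | none => exact h
          | some a => simp only; exact List.mem_append.2 (Or.inl h)
        · rw [hget]
          by_cases hc : x ∈ acc
          · exact List.mem_append.2 (Or.inl hc)
          · exact List.mem_append.2 (Or.inr (List.mem_filter.2 ⟨hx, by simp [hc]⟩))
      · simp only [List.foldl]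
        exact ih _ hv

theorem pvStep_adj (graph : List (Int × List Int)) (S : List Int) (v x : Int) (adj : List Int)
    (hv : v ∈ S) (hget : (PySem.Dict.mk graph).get? v = some adj) (hx : x ∈ adj) :
    x ∈ pvStepR graph S :=
  pvStep_adj_aux graph v x adj hget hx S S hv

theorem pvIter_mono (graph : List (Int × List Int)) (S : List Int) (x : Int) :
    ∀ i j, i ≤ j → x ∈ pvIter graph i S → x ∈ pvIter graph j S := by
  intro i j h
  induction h with
  | refl => exact id
  | step _ ih =>
      intro hx
      exact pvStep_sub graph _ x (ih hx)

theorem pvKB_le (graph : List (Int × List Int)) (vis : PySem.Set Int) :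
    pvKB graph vis ≤ graph.length :=
  List.length_filter_le _ _

theorem pvDfsB_skip (graph : List (Int × List Int)) (g : Nat) (st : PySem.Set Int × List Int) (v : Int)
    (h : v ∈ st.1) : pvDfsB graph g st v = st := by
  cases g with
  | zero => rfl
  | succ g => simp [pvDfsB, h]

theorem pvFoldlCongr {α β : Type} (f f' : α → β → α) (P : α → Prop)
    (hcong : ∀ st v, P st → f st v = f' st v) (hpres : ∀ st v, P st → P (f st v)) :
    ∀ (l : List β) (st : α), P st → List.foldl f st l = List.foldl f' st l := by
  intro l
  induction l with
  | nil => intro st _; rfl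
  | cons x l ih =>
      intro st hst
      simp only [List.foldl]
      rw [← hcong st x hst]
      exact ih (f st x) (hpres st x hst)

theorem pvDfsB_pres (graph : List (Int × List Int)) :
    ∀ (g : Nat) (st : PySem.Set Int × List Int) (v x : Int),
      x ∈ st.1 → x ∈ (pvDfsB graph g st v).1 := by
  intro g
  induction g with
  | zero => intro st v x h; simpa [pvDfsB] using h
  | succ g ih =>
      intro st v x h
      have hadd : x ∈ PySem.Set.add st.1 v := (PySem.Set.mem_add st.1 v x).2 (Or.inl h)
      by_cases hc : v ∈ st.1
      · simpa [pvDfsB, hc] using h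
      · cases hget : (PySem.Dict.mk graph).get? v with
        | none => simp [pvDfsB, hc, hget]; exact Or.inl h
        | some adj =>
            simp only [pvDfsB, hget]
            rw [if_neg (by simpa using hc)]
            exact pvFoldlPres (pvDfsB graph g) (fun st => x ∈ st.1)
              (fun st v hst => ih st v x hst) _ (PySem.Set.add st.1 v, st.2 ++ [v]) hadd

theorem pvKB_mono (graph : List (Int × List Int)) (v1 v2 : PySem.Set Int)
    (h : ∀ x, x ∈ v1 → x ∈ v2) :
    pvKB graph v2 ≤ pvKB graph v1 := by
  unfold pvKB
  refine List.Sublist.length_le (List.monotone_filter_right graph ?_)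
  intro p hp
  rw [Bool.not_eq_true'] at hp ⊢
  cases hv1 : PySem.Set.contains v1 p.1 with
  | false => rfl
  | true =>
      have := (PySem.Set.contains_iff v2 p.1).2 (h p.1 ((PySem.Set.contains_iff v1 p.1).1 hv1))
      rw [this] at hp; exact hp

theorem pvS_mono (graph : List (Int × List Int)) (v1 v2 : PySem.Set Int)
    (h : ∀ x, x ∈ v1 → x ∈ v2) :
    pvS graph v2 ≤ pvS graph v1 := by
  unfold pvS
  refine List.Sublist.sum_le_sum (List.Sublist.map _ (List.monotone_filter_right graph ?_)) ?_
  · intro p hp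
    rw [Bool.not_eq_true'] at hp ⊢
    cases hv1 : PySem.Set.contains v1 p.1 with
    | false => rfl
    | true =>
        have := (PySem.Set.contains_iff v2 p.1).2 (h p.1 ((PySem.Set.contains_iff v1 p.1).1 hv1))
        rw [this] at hp; exact hp
  · intro x _; exact Nat.zero_le x

theorem pvKB_add_lt (graph : List (Int × List Int)) (c : Int) (adj : List Int) (vis : PySem.Set Int)
    (hget : (PySem.Dict.mk graph).get? c = some adj) (hc : c ∉ vis) :
    pvKB graph (PySem.Set.add vis c) < pvKB graph vis := by
  induction graph with
  | nil => simp [PySem.Dict.get?] at hget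
  | cons p t ih =>
      rw [PySem.Dict.get?_mk_cons] at hget
      by_cases hk : p.1 = c
      · have h2 : p.1 ∉ vis := by rw [hk]; exact hc
        have hmono : pvKB t (PySem.Set.add vis c) ≤ pvKB t vis :=
          pvKB_mono t vis (PySem.Set.add vis c) (fun x hx => (PySem.Set.mem_add vis c x).2 (Or.inl hx))
        unfold pvKB at hmono ⊢
        simp [hk, hc] at hmono ⊢
        omega
      · rw [show (p.1 == c) = false by simp [hk]] at hget
        simp only [Bool.false_eq_true, if_false] at hget
        have := ih hget
        unfold pvKB at this ⊢
        by_cases hpv : p.1 ∈ vis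
        · simp [hk, hpv] at this ⊢
          omega
        · simp [hk, hpv] at this ⊢
          omega

theorem pvS_add_le (graph : List (Int × List Int)) (c : Int) (adj : List Int) (vis : PySem.Set Int)
    (hget : (PySem.Dict.mk graph).get? c = some adj) (hc : c ∉ vis) :
    pvS graph (PySem.Set.add vis c) + adj.length ≤ pvS graph vis := by
  induction graph with
  | nil => simp [PySem.Dict.get?] at hget
  | cons p t ih =>
      rw [PySem.Dict.get?_mk_cons] at hget
      by_cases hk : p.1 = c
      · rw [show (p.1 == c) = true by simp [hk]] at hget
        simp only [if_true] at hget
        have hadj : adj = p.2 := by injection hget with h; exact h.symm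
        have h2 : p.1 ∉ vis := by rw [hk]; exact hc
        have hmono : pvS t (PySem.Set.add vis c) ≤ pvS t vis :=
          pvS_mono t vis (PySem.Set.add vis c) (fun x hx => (PySem.Set.mem_add vis c x).2 (Or.inl hx))
        unfold pvS at hmono ⊢
        simp [hk, hc, hadj] at hmono ⊢
        omega
      · rw [show (p.1 == c) = false by simp [hk]] at hget
        simp only [Bool.false_eq_true, if_false] at hget
        have := ih hget
        unfold pvS at this ⊢
        by_cases hpv : p.1 ∈ vis
        · simp [hk, hpv] at this ⊢
          omega
        · simp [hk, hpv] at this ⊢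
          omega

theorem pvKB_dfsB_le (graph : List (Int × List Int)) (g : Nat) (st : PySem.Set Int × List Int) (v : Int) :
    pvKB graph (pvDfsB graph g st v).1 ≤ pvKB graph st.1 :=
  pvKB_mono graph st.1 (pvDfsB graph g st v).1 (fun x hx => pvDfsB_pres graph g st v x hx)

theorem pvDfsB_irr (graph : List (Int × List Int)) :
    ∀ (g g' : Nat) (st : PySem.Set Int × List Int) (v : Int),
      pvKB graph st.1 < g → pvKB graph st.1 < g' → pvDfsB graph g st v = pvDfsB graph g' st v := by
  intro g
  induction g with
  | zero => intro g' st v h _; exact absurd h (Nat.not_lt_zero _)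
  | succ g ih =>
      intro g' st v h h'
      cases g' with
      | zero => exact absurd h' (Nat.not_lt_zero _)
      | succ g'' =>
          by_cases hv : v ∈ st.1
          · simp [pvDfsB, hv]
          · cases hget : (PySem.Dict.mk graph).get? v with
            | none => simp [pvDfsB, hv, hget]
            | some adj =>
                simp only [pvDfsB, hget]
                rw [if_neg (by simpa using hv), if_neg (by simpa using hv)]
                have hlt : pvKB graph (PySem.Set.add st.1 v) < pvKB graph st.1 :=
                  pvKB_add_lt graph v adj st.1 hget hv
                have hb1 : pvKB graph (PySem.Set.add st.1 v) < g := by omega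
                have hb2 : pvKB graph (PySem.Set.add st.1 v) < g'' := by omega
                refine pvFoldlCongr (pvDfsB graph g) (pvDfsB graph g'')
                  (fun s => pvKB graph s.1 < g ∧ pvKB graph s.1 < g'') ?_ ?_ _ _ ⟨hb1, hb2⟩
                · intro s w hs; exact ih g'' s w hs.1 hs.2
                · intro s w hs
                  have := pvKB_dfsB_le graph g s w
                  exact ⟨by omega, by omega⟩

theorem pvFilterErase (graph : List (Int × List Int)) (g : Nat) (vis0 : PySem.Set Int) :
    ∀ (l : List Int) (rest : List Int) (st : PySem.Set Int × List Int),
      (∀ x, x ∈ vis0 → x ∈ st.1) →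
      List.foldl (pvDfsB graph g) st (l.filter (fun n => !(PySem.Set.contains vis0 n)) ++ rest)
        = List.foldl (pvDfsB graph g) st (l ++ rest) := by
  intro l
  induction l with
  | nil => intro rest st _; rfl
  | cons x l ih =>
      intro rest st hst
      by_cases hx : x ∈ vis0
      · rw [List.filter_cons, if_neg (by simpa using hx)]
        simp only [List.cons_append, List.foldl]
        rw [pvDfsB_skip graph g st x (hst x hx)]
        exact ih rest st hst
      · rw [List.filter_cons, if_pos (by simpa using hx)]
        simp only [List.cons_append, List.foldl]
        exact ih rest (pvDfsB graph g st x)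
          (fun y hy => pvDfsB_pres graph g st x y (hst y hy))

theorem pvPushShape (P : Int → Bool) :
    ∀ (l rest : List Int),
      l.foldl (fun s n => if P n then s else n :: s) rest
        = (l.filter (fun n => !(P n))).reverse ++ rest := by
  intro l
  induction l with
  | nil => intro rest; rfl
  | cons x l ih =>
      intro rest
      cases hp : P x with
      | true => simp [List.foldl, hp, ih]
      | false =>
          simp only [List.foldl, List.filter_cons, hp, Bool.not_false, if_true, if_false,
            Bool.false_eq_true, List.reverse_cons, List.append_assoc, List.singleton_append]
          exact ih (x :: rest)

theorem pvDescReverse (xs : List Int) :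
    (PySem.List.sorted xs (fun x => x) true).reverse = PySem.List.sorted xs (fun x => x) := by
  refine (PySem.List.sorted_id_eq_of_perm_of_pairwise xs _ ?_ ?_).symm
  · exact (List.reverse_perm _).trans (PySem.List.sorted_perm xs _ true)
  · rw [List.pairwise_reverse]
    exact PySem.List.sorted_pairwise_rev xs (fun x => x)

theorem pvS_le (graph : List (Int × List Int)) (vis : PySem.Set Int) :
    pvS graph vis ≤ pvAdjSum graph := by
  unfold pvS pvAdjSum
  exact List.Sublist.sum_le_sum (List.Sublist.map _ List.filter_sublist)
    (fun x _ => Nat.zero_le x)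

theorem pvMain (graph : List (Int × List Int)) (start : Int)
    (hpre : ∀ v ∈ pvIter graph (graph.length + 1) [start], ((PySem.Dict.mk graph).get? v).isSome = true) :
    ∀ (f : Nat) (vis : PySem.Set Int) (stack trav : List Int),
      (∀ v ∈ stack, v ∈ pvIter graph (graph.length + 1 - pvKB graph vis) [start]) →
      stack.length + pvS graph vis < f →
      ∀ g, pvKB graph vis < g →
      pvDfsALoop graph f vis stack trav = (List.foldl (pvDfsB graph g) (vis, trav) stack).2 := by
  intro f
  induction f with
  | zero => intro vis stack trav _ hbound _ _; exact absurd hbound (Nat.not_lt_zero _)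
  | succ f ih =>
      intro vis stack trav hstack hbound g hg'
      cases stack with
      | nil => simp [pvDfsALoop, List.foldl]
      | cons c rest =>
          by_cases hv : c ∈ vis
          · simp only [pvDfsALoop]
            rw [if_pos (by simpa using hv)]
            simp only [List.foldl]
            rw [pvDfsB_skip graph g (vis, trav) c hv]
            refine ih vis rest trav (fun v hvv => hstack v (List.mem_cons_of_mem c hvv)) ?_ g hg'
            simp only [List.length_cons] at hbound
            omega
          · -- c is an unvisited vertex on the stack: it lies in the saturation, hence is a key
            have hcIter : c ∈ pvIter graph (graph.length + 1 - pvKB graph vis) [start] :=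
              hstack c List.mem_cons_self
            have hkey : ((PySem.Dict.mk graph).get? c).isSome = true :=
              hpre c (pvIter_mono graph [start] c _ _ (by omega) hcIter)
            obtain ⟨adj, hget⟩ := Option.isSome_iff_exists.1 hkey
            cases g with
            | zero => exact absurd hg' (Nat.not_lt_zero _)
            | succ g0 =>
                have hkb_add : pvKB graph (PySem.Set.add vis c) < pvKB graph vis :=
                  pvKB_add_lt graph c adj vis hget hv
                have hkble : pvKB graph vis ≤ graph.length := pvKB_le graph vis
                -- unfold A's step
                simp only [pvDfsALoop, hget]
                rw [if_neg (by simpa using hv)]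
                rw [pvPushShape]
                rw [← List.filter_reverse, pvDescReverse]
                -- apply the induction hypothesis at fuel g0+1
                have hfilterlen :
                    ((PySem.List.sorted adj (fun x => x)).filter
                      (fun n => !(PySem.Set.contains (PySem.Set.add vis c) n))).length ≤ adj.length := by
                  calc ((PySem.List.sorted adj (fun x => x)).filter
                        (fun n => !(PySem.Set.contains (PySem.Set.add vis c) n))).length
                      ≤ (PySem.List.sorted adj (fun x => x)).length := List.length_filter_le _ _
                    _ = adj.length := PySem.List.length_sorted adj _ _
                have hSadd := pvS_add_le graph c adj vis hget hv
                have hstack' : ∀ v ∈ ((PySem.List.sorted adj (fun x => x)).filter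
                    (fun n => !(PySem.Set.contains (PySem.Set.add vis c) n))) ++ rest,
                    v ∈ pvIter graph (graph.length + 1 - pvKB graph (PySem.Set.add vis c)) [start] := by
                  intro v hvv
                  rcases List.mem_append.1 hvv with hvv | hvv
                  · -- v is a neighbor of c: one more saturation round reaches it
                    have hvadj : v ∈ adj := (PySem.List.mem_sorted adj (fun x => x) false v).1
                      (List.mem_of_mem_filter hvv)
                    have : v ∈ pvIter graph (graph.length + 1 - pvKB graph vis + 1) [start] :=
                      pvStep_adj graph _ c v adj hcIter hget hvadj
                    exact pvIter_mono graph [start] v _ _ (by omega) this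
                  · exact pvIter_mono graph [start] v _ _ (by omega)
                      (hstack v (List.mem_cons_of_mem c hvv))
                have hbound' : (((PySem.List.sorted adj (fun x => x)).filter
                    (fun n => !(PySem.Set.contains (PySem.Set.add vis c) n))) ++ rest).length
                    + pvS graph (PySem.Set.add vis c) < f := by
                  rw [List.length_append]
                  simp only [List.length_cons] at hbound
                  omega
                rw [ih (PySem.Set.add vis c) _ (trav ++ [c]) hstack' hbound' (g0 + 1) (by omega)]
                -- drop the filter on B's side
                rw [pvFilterErase graph (g0 + 1) (PySem.Set.add vis c) _ rest _ (fun x hx => hx)]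
                -- B's step
                simp only [List.foldl_append, List.foldl]
                have hBstep : pvDfsB graph (g0 + 1) (vis, trav) c
                    = List.foldl (pvDfsB graph g0) (PySem.Set.add vis c, trav ++ [c])
                        (PySem.List.sorted adj (fun x => x)) := by
                  simp only [pvDfsB, hget]
                  rw [if_neg (by simpa using hv)]
                rw [hBstep]
                -- align the fuel on the expanded neighbors
                have hfuel : List.foldl (pvDfsB graph (g0 + 1)) (PySem.Set.add vis c, trav ++ [c])
                    (PySem.List.sorted adj (fun x => x))
                    = List.foldl (pvDfsB graph g0) (PySem.Set.add vis c, trav ++ [c])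
                        (PySem.List.sorted adj (fun x => x)) := by
                  refine pvFoldlCongr (pvDfsB graph (g0 + 1)) (pvDfsB graph g0)
                    (fun s => pvKB graph s.1 < g0) ?_ ?_ _ _ (by simp only; omega)
                  · intro s w hs; exact pvDfsB_irr graph (g0 + 1) g0 s w (by omega) hs
                  · intro s w hs
                    have := pvKB_dfsB_le graph (g0 + 1) s w
                    omega
                rw [hfuel]

-- ===== VERDICT (by name: the statement is the Claim_ definition above) =====
theorem iterative_adjacency_dict_dfs_spec : Claim_equal_iterative_adjacency_dict_dfs := by
  intro graph start _ hpre
  unfold Spec_iterative_adjacency_dict_dfs iterative_adjacency_dict_dfs iterative_adjacency_dict_dfs_alt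
  have hstack : ∀ v ∈ [start], v ∈ pvIter graph (graph.length + 1 - pvKB graph PySem.Set.empty) [start] := by
    intro v hvv
    rw [List.mem_singleton] at hvv
    subst hvv
    have h1 : v ∈ pvIter graph 1 [v] := pvStep_sub graph [v] v (List.mem_singleton.2 rfl)
    have h2 : pvKB graph PySem.Set.empty ≤ graph.length := pvKB_le graph PySem.Set.empty
    exact pvIter_mono graph [v] v 1 _ (by omega) h1
  have hbound : ([start] : List Int).length + pvS graph PySem.Set.empty < pvAdjSum graph + 2 := by
    have := pvS_le graph PySem.Set.empty
    simp only [List.length_singleton]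
    omega
  have hkb : pvKB graph PySem.Set.empty < graph.length + 1 := by
    have : pvKB graph PySem.Set.empty ≤ graph.length := pvKB_le graph PySem.Set.empty
    omega
  have := pvMain graph start hpre (pvAdjSum graph + 2) PySem.Set.empty [start] [] hstack hbound
    (graph.length + 1) hkb
  simpa [List.foldl] using this
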